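-- pv_equiv track=rewrite | github.com/DevKlim/tldrimportance | src/app.py | group_tokens_by_label
-- ===== SOURCE A (Python) =====
-- def group_tokens_by_label(tokens, labels, offsets, original_text):
--     """
--     Groups consecutive tokens with the same label into single chunks,
--     recovering the original text for each chunk using offsets.
--     This handles subword tokens and reconstructs the original spacing.
--     """
--     results = []
--     if not tokens:
--         return results
--
--     current_label = labels[0]
--     start_offset = offsets[0][0]
--
--     for i in range(1, len(tokens)):
--         if labels[i] != current_label:
--             end_offset = offsets[i - 1][1]
--             results.append({
--                 "text": original_text[start_offset:end_offset],
--                 "label": current_label,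
--             })
--             current_label = labels[i]
--             start_offset = offsets[i][0]
--
--     # Add the last chunk
--     end_offset = offsets[-1][1]
--     results.append({
--         "text": original_text[start_offset:end_offset],
--         "label": current_label,
--     })
--
--     return results
-- ===== SOURCE B (Python) =====
-- def group_tokens_by_label(tokens, labels, offsets, original_text):
--     """Two staged passes over precomputed boundary indices:
--     pass 1 collects the start index of every label run (0 plus each i with
--     labels[i] != labels[i-1]); pass 2 builds one chunk per (start, next_start)
--     pair, ending the last chunk at offsets[-1][1]."""
--     n = len(tokens)
--     if n == 0:
--         return []
--     starts = [0] + [i for i in range(1, n) if labels[i] != labels[i - 1]]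
--     ends = starts[1:] + [None]
--     return [
--         {
--             "text": original_text[
--                 offsets[s][0]:(offsets[e - 1][1] if e is not None else offsets[-1][1])
--             ],
--             "label": labels[s],
--         }
--         for s, e in zip(starts, ends)
--     ]
-- ===== Notes on version B (the rewrite author's own statement) =====
-- stated objective: alternative
-- what changed: A is a single stateful pass carrying (results, current_label, start_offset) and flushing on label change; B has no carried state: a first pass precomputes the list of run start indices, and a second pass maps each consecutive (start, next_start) pair to its chunk.
import Mathlib
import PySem

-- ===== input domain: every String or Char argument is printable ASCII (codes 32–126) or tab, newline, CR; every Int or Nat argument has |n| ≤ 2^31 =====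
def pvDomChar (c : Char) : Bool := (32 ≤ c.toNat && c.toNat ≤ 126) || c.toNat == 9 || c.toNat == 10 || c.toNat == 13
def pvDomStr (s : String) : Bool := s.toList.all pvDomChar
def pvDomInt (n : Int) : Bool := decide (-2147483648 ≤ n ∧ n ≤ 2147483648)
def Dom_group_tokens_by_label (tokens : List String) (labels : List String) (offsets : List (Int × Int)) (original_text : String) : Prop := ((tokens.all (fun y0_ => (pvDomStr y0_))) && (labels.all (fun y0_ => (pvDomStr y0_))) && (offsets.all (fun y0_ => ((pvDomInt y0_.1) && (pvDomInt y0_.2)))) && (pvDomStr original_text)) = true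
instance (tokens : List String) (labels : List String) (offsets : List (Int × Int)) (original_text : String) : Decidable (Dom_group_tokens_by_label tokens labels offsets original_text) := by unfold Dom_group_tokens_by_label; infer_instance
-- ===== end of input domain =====

-- B replaces A's single stateful flush-on-change pass with two staged passes: collect run start indices first, then map consecutive start pairs to chunks (alternative decomposition, same cost).


-- ===== PORT A =====
-- {"text": ..., "label": ...} dict literal, shared by both ports
def pvChunk (text : String) (st en : Int) (lab : String) : List (String × String) :=
  [("text", PySem.Str.slice text (some st) (some en)), ("label", lab)]

-- loop body of A's 'for i in range(1, len(tokens))'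
def pvStepA (labels : List String) (offsets : List (Int × Int)) (text : String)
    (s : List (List (String × String)) × String × Int) (i : Int) :
    List (List (String × String)) × String × Int :=
  if PySem.List.pyGetD labels i "" ≠ s.2.1 then
    (s.1 ++ [pvChunk text s.2.2 (PySem.List.pyGetD offsets (i - 1) (0, 0)).2 s.2.1],
     PySem.List.pyGetD labels i "", (PySem.List.pyGetD offsets i (0, 0)).1)
  else s

def group_tokens_by_label (tokens : List String) (labels : List String) (offsets : List (Int × Int)) (original_text : String) : List (List (String × String)) :=
  if tokens = [] then []
  else
    let s := (PySem.List.pyRange 1 (tokens.length : Int) 1).foldl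
      (pvStepA labels offsets original_text)
      ([], PySem.List.pyGetD labels 0 "", (PySem.List.pyGetD offsets 0 (0, 0)).1)
    s.1 ++ [pvChunk original_text s.2.2 (PySem.List.pyGetD offsets (-1) (0, 0)).2 s.2.1]

-- ===== PORT B =====
-- 'labels[i] != labels[i-1]' filter condition of Source B's first pass
def pvIsBoundary (labels : List String) (i : Int) : Bool :=
  PySem.List.pyGetD labels i "" ≠ PySem.List.pyGetD labels (i - 1) ""

-- 'offsets[e-1][1] if e is not None else offsets[-1][1]'
def pvEndOf (offsets : List (Int × Int)) (e : Option Int) : Int :=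
  match e with
  | some e => (PySem.List.pyGetD offsets (e - 1) (0, 0)).2
  | none => (PySem.List.pyGetD offsets (-1) (0, 0)).2

def group_tokens_by_label_alt (tokens : List String) (labels : List String) (offsets : List (Int × Int)) (original_text : String) : List (List (String × String)) :=
  if tokens.length = 0 then []
  else
    let starts : List Int :=
      0 :: (PySem.List.pyRange 1 (tokens.length : Int) 1).filter (pvIsBoundary labels)
    let ends : List (Option Int) := (starts.drop 1).map some ++ [none]
    (starts.zip ends).map (fun se =>
      pvChunk original_text (PySem.List.pyGetD offsets se.1 (0, 0)).1
        (pvEndOf offsets se.2) (PySem.List.pyGetD labels se.1 ""))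

-- ===== PRECONDITION & SPEC =====
-- Pre_ is exactly the inputs on which A returns: it excludes only the inputs where A raises
-- IndexError — labels shorter than tokens, offsets empty, or a label-boundary index i
-- (labels[i] != labels[i-1]) at or past the end of offsets.
def Pre_group_tokens_by_label (tokens : List String) (labels : List String) (offsets : List (Int × Int)) (original_text : String) : Prop :=
  tokens = [] ∨ (tokens.length ≤ labels.length ∧ offsets ≠ [] ∧
    ∀ i, i < tokens.length → 1 ≤ i → labels[i]?.getD "" ≠ labels[i - 1]?.getD "" →
      i < offsets.length)
instance (tokens : List String) (labels : List String) (offsets : List (Int × Int)) (original_text : String) : Decidable (Pre_group_tokens_by_label tokens labels offsets original_text) := by unfold Pre_group_tokens_by_label; infer_instance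

def pvWitness_group_tokens_by_label : List String × List String × (List (Int × Int)) × String :=
  (["a", "b", "c"], ["X", "X", "Y"], [(0, 1), (2, 3), (4, 5)], "hello")

def Spec_group_tokens_by_label (tokens : List String) (labels : List String) (offsets : List (Int × Int)) (original_text : String) (out : List (List (String × String))) : Prop := out = group_tokens_by_label_alt tokens labels offsets original_text
instance (tokens : List String) (labels : List String) (offsets : List (Int × Int)) (original_text : String) (out : List (List (String × String))) : Decidable (Spec_group_tokens_by_label tokens labels offsets original_text out) := by unfold Spec_group_tokens_by_label; infer_instance

-- ===== CLAIM (what is proved, stated in full; the proofs are below) =====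
def Claim_equal_group_tokens_by_label : Prop := ∀ (tokens : List String) (labels : List String) (offsets : List (Int × Int)) (original_text : String), Dom_group_tokens_by_label tokens labels offsets original_text → Pre_group_tokens_by_label tokens labels offsets original_text → Spec_group_tokens_by_label tokens labels offsets original_text (group_tokens_by_label tokens labels offsets original_text)

-- ===== LEMMAS AND PROOFS =====

-- proof-side normal form: the chunk list determined by a start state and the boundary list
def pvChunks (labels : List String) (offsets : List (Int × Int)) (text : String) (st : Int) (lab : String) :
    List Int → List (List (String × String))
  | [] => [pvChunk text st (PySem.List.pyGetD offsets (-1) (0, 0)).2 lab]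
  | j :: rest =>
      pvChunk text st (PySem.List.pyGetD offsets (j - 1) (0, 0)).2 lab
        :: pvChunks labels offsets text (PySem.List.pyGetD offsets j (0, 0)).1
             (PySem.List.pyGetD labels j "") rest

-- B's zip/map over the start list equals pvChunks
theorem pv_zipmap_eq_chunks (labels : List String) (offsets : List (Int × Int)) (text : String) :
    ∀ (bs : List Int) (s0 : Int),
    (((s0 :: bs).zip ((bs.map some) ++ [none])).map (fun se =>
        pvChunk text (PySem.List.pyGetD offsets se.1 (0, 0)).1
          (pvEndOf offsets se.2) (PySem.List.pyGetD labels se.1 "")))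
      = pvChunks labels offsets text (PySem.List.pyGetD offsets s0 (0, 0)).1
          (PySem.List.pyGetD labels s0 "") bs := by
  intro bs
  induction bs with
  | nil => intro s0; simp [pvChunks, pvEndOf]
  | cons j rest ih =>
    intro s0
    simp only [List.map_cons, List.cons_append, List.zip_cons_cons, List.map_cons]
    rw [ih j]
    rfl

-- A's fold from index i, with its carried label equal to labels[i-1], produces
-- the chunks of the boundaries in [i, n)
theorem pv_fold_eq_chunks (labels : List String) (offsets : List (Int × Int)) (text : String)
    (n : Nat) :
    ∀ (d i : Nat), n - i ≤ d → 1 ≤ i →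
    ∀ (res : List (List (String × String))) (lab : String) (st : Int),
    lab = PySem.List.pyGetD labels ((i : Int) - 1) "" →
    (let s := (PySem.List.pyRange (i : Int) (n : Int) 1).foldl (pvStepA labels offsets text) (res, lab, st)
     s.1 ++ [pvChunk text s.2.2 (PySem.List.pyGetD offsets (-1) (0, 0)).2 s.2.1])
      = res ++ pvChunks labels offsets text st lab
          ((PySem.List.pyRange (i : Int) (n : Int) 1).filter (pvIsBoundary labels)) := by
  intro d
  induction d with
  | zero =>
    intro i hd h1 res lab st hlab
    rw [PySem.List.pyRange_one_eq_nil (by omega : (n : Int) ≤ (i : Int))]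
    simp [pvChunks]
  | succ d ih =>
    intro i hd h1 res lab st hlab
    by_cases hin : n ≤ i
    · rw [PySem.List.pyRange_one_eq_nil (by omega : (n : Int) ≤ (i : Int))]
      simp [pvChunks]
    · rw [PySem.List.pyRange_one_cons (by omega : (i : Int) < (n : Int))]
      have hcast : (i : Int) + 1 = ((i + 1 : Nat) : Int) := by push_cast; ring
      have hcast' : ((i + 1 : Nat) : Int) - 1 = (i : Int) := by push_cast; ring
      by_cases hb : pvIsBoundary labels (i : Int) = true
      · have hne : PySem.List.pyGetD labels (i : Int) "" ≠ lab := by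
          rw [hlab]; simpa [pvIsBoundary] using hb
        have hne' : ¬ labels[i]?.getD "" = lab := by
          simpa [PySem.List.pyGetD_natCast] using hne
        rw [List.filter_cons, if_pos hb]
        simp only [List.foldl_cons]
        have hstep : pvStepA labels offsets text (res, lab, st) (i : Int)
            = (res ++ [pvChunk text st (PySem.List.pyGetD offsets ((i : Int) - 1) (0, 0)).2 lab],
               PySem.List.pyGetD labels (i : Int) "", (PySem.List.pyGetD offsets (i : Int) (0, 0)).1) := by
          simp [pvStepA, hne']
        rw [hstep, hcast,
          ih (i + 1) (by omega) (by omega) _ _ _ (by rw [hcast'])]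
        simp [pvChunks]
      · have heq : PySem.List.pyGetD labels (i : Int) "" = lab := by
          rw [hlab]; by_contra hne
          exact hb (by simpa [pvIsBoundary] using hne)
        have heq' : labels[i]?.getD "" = lab := by
          simpa [PySem.List.pyGetD_natCast] using heq
        rw [List.filter_cons, if_neg hb]
        simp only [List.foldl_cons]
        have hstep : pvStepA labels offsets text (res, lab, st) (i : Int) = (res, lab, st) := by
          simp [pvStepA, heq']
        rw [hstep, hcast,
          ih (i + 1) (by omega) (by omega) res lab st (by rw [hcast', ← heq])]

-- ===== VERDICT (by name: the statement is the Claim_ definition above) =====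
theorem group_tokens_by_label_spec : Claim_equal_group_tokens_by_label := by
  intro tokens labels offsets original_text hdom hpre
  unfold Spec_group_tokens_by_label
  by_cases htok : tokens = []
  · subst htok
    simp [group_tokens_by_label, group_tokens_by_label_alt]
  · have hn : 1 ≤ tokens.length := by
      cases tokens with
      | nil => exact absurd rfl htok
      | cons a l => simp
    have hA := pv_fold_eq_chunks labels offsets original_text tokens.length
      tokens.length 1 (by omega) (by omega)
      [] (PySem.List.pyGetD labels 0 "") (PySem.List.pyGetD offsets 0 (0, 0)).1
      (by norm_num)
    have hB := pv_zipmap_eq_chunks labels offsets original_text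
      ((PySem.List.pyRange 1 (tokens.length : Int) 1).filter (pvIsBoundary labels)) 0
    simp only [group_tokens_by_label, if_neg htok,
      group_tokens_by_label_alt, if_neg (by omega : ¬ tokens.length = 0)]
    simp only [Nat.cast_one] at hA
    rw [hA]
    simp only [List.drop_one, List.tail_cons]
    rw [hB]
    simp
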